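-- pv_equiv track=rewrite | github.com/qiboteam/qft-interpolation | qft_interpolation_class.py | prepare_reg_un
-- ===== SOURCE A (Python) =====
-- def prepare_reg_un(reg_bin, reg_extra):
--     r = []
--     c = 0
--     n = len(reg_bin)
--     for i in reversed(range(n)):
--         r.append(reg_bin[n-1-i])
--         for _ in range(0,(2**i)-1):
--             r.append(reg_extra[c])
--             c += 1
--     r.append(reg_extra[c])
--     return r
-- ===== SOURCE B (Python) =====
-- def prepare_reg_un(reg_bin, reg_extra):
--     if not reg_bin:
--         return [reg_extra[0]]
--     m = 2 ** (len(reg_bin) - 1) - 1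
--     return [reg_bin[0]] + reg_extra[:m] + prepare_reg_un(reg_bin[1:], reg_extra[m:])
-- ===== Notes on version B (the rewrite author's own statement) =====
-- stated objective: simpler
-- what changed: A's nested reversed-index loops with a running ancilla counter are replaced by structural recursion on reg_bin that emits the head bit, slices off the next 2**(len-1)-1 ancillas, and recurses on the tails.
import Mathlib
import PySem

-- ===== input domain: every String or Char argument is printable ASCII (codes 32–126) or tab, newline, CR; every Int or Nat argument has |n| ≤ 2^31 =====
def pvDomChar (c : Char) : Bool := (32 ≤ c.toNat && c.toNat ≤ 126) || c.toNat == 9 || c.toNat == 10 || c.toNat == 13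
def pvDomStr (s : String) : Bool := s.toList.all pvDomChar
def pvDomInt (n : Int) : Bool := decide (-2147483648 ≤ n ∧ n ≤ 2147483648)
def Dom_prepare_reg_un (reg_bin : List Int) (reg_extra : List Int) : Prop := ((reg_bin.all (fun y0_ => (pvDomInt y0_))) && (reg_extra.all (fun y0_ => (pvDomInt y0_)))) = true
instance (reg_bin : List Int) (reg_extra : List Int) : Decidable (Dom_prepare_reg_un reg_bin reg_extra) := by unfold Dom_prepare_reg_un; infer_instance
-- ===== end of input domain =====

-- B replaces A's nested counter-driven loops by structural recursion on reg_bin with list slices (simpler decomposition; same cost).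

-- ===== PORT A =====
-- inner loop: for _ in range(0, m): r.append(reg_extra[c]); c += 1   (state = (r, c))
def pvInnerA (extra : List Int) (m : Nat) (s : List Int × Nat) : List Int × Nat :=
  (List.range m).foldl (fun s _ => (s.1 ++ [PySem.List.pyGetD extra ((s.2 : Nat) : Int) 0], s.2 + 1)) s

-- outer loop: for i in reversed(range(n)): r.append(reg_bin[n-1-i]); <inner loop with m = 2**i - 1>
def pvOuterA (reg_bin extra : List Int) (n : Nat) (s : List Int × Nat) : List Int × Nat :=
  ((List.range n).reverse).foldl
    (fun s i => pvInnerA extra (2 ^ i - 1)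
      (s.1 ++ [PySem.List.pyGetD reg_bin (((n - 1 - i : Nat) : Int)) 0], s.2)) s

def prepare_reg_un (reg_bin : List Int) (reg_extra : List Int) : List Int :=
  let n := reg_bin.length
  let s := pvOuterA reg_bin reg_extra n ([], 0)
  s.1 ++ [PySem.List.pyGetD reg_extra ((s.2 : Nat) : Int) 0]

-- ===== PORT B =====
-- Source B: recursion on reg_bin; slices reg_extra[:m] / reg_extra[m:] with m = 2**(len-1) - 1
def prepare_reg_un_alt : List Int → List Int → List Int
  | [], reg_extra => [PySem.List.pyGetD reg_extra 0 0]
  | b :: bs, reg_extra =>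
      let m : Nat := 2 ^ bs.length - 1
      ([b] ++ PySem.List.slice reg_extra none (some (m : Int)))
        ++ prepare_reg_un_alt bs (PySem.List.slice reg_extra (some (m : Int)) none)

-- ===== PRECONDITION & SPEC =====
-- Pre_ excludes exactly the inputs on which Python A raises IndexError: it consumes
-- 2^len(reg_bin) - len(reg_bin) elements of reg_extra, so fewer extras means a crash (B raises there too).
def Pre_prepare_reg_un (reg_bin : List Int) (reg_extra : List Int) : Prop :=
  2 ^ reg_bin.length - reg_bin.length ≤ reg_extra.length
instance (reg_bin : List Int) (reg_extra : List Int) : Decidable (Pre_prepare_reg_un reg_bin reg_extra) := by unfold Pre_prepare_reg_un; infer_instance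

def pvWitness_prepare_reg_un : List Int × List Int := ([1, 0], [5, 6, 7])

def Spec_prepare_reg_un (reg_bin : List Int) (reg_extra : List Int) (out : List Int) : Prop := out = prepare_reg_un_alt reg_bin reg_extra
instance (reg_bin : List Int) (reg_extra : List Int) (out : List Int) : Decidable (Spec_prepare_reg_un reg_bin reg_extra out) := by unfold Spec_prepare_reg_un; infer_instance

-- ===== CLAIM (what is proved, stated in full; the proofs are below) =====
def Claim_equal_prepare_reg_un : Prop := ∀ (reg_bin : List Int) (reg_extra : List Int), Dom_prepare_reg_un reg_bin reg_extra → Pre_prepare_reg_un reg_bin reg_extra → Spec_prepare_reg_un reg_bin reg_extra (prepare_reg_un reg_bin reg_extra)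

-- ===== LEMMAS AND PROOFS =====

-- the block of extras A consumes at positions c, c+1, …, c+m-1
def pvChunk (extra : List Int) (c m : Nat) : List Int :=
  (List.range m).map (fun j => PySem.List.pyGetD extra (((c + j : Nat) : Int)) 0)

-- common reference shape of the output, offset c into the extras
def pvSpec : List Int → List Int → Nat → List Int
  | [], extra, c => [PySem.List.pyGetD extra ((c : Nat) : Int) 0]
  | b :: bs, extra, c =>
      b :: pvChunk extra c (2 ^ bs.length - 1) ++ pvSpec bs extra (c + (2 ^ bs.length - 1))

lemma pvChunk_succ (extra : List Int) (c m : Nat) :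
    pvChunk extra c (m + 1) = pvChunk extra c m ++ [PySem.List.pyGetD extra (((c + m : Nat) : Int)) 0] := by
  simp [pvChunk, List.range_succ]

lemma pvInnerA_eq (extra : List Int) (m : Nat) (r : List Int) (c : Nat) :
    pvInnerA extra m (r, c) = (r ++ pvChunk extra c m, c + m) := by
  induction m with
  | zero => simp [pvInnerA, pvChunk]
  | succ m ih =>
      simp only [pvInnerA, List.range_succ, List.foldl_append, List.foldl_cons, List.foldl_nil]
      simp only [pvInnerA] at ih
      rw [ih, pvChunk_succ]
      simp [List.append_assoc, Nat.add_assoc]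

lemma pvOuterA_cons (b : Int) (bs extra : List Int) (r : List Int) (c : Nat) :
    pvOuterA (b :: bs) extra (bs.length + 1) (r, c)
      = pvOuterA bs extra bs.length
          (r ++ b :: pvChunk extra c (2 ^ bs.length - 1), c + (2 ^ bs.length - 1)) := by
  have hrev : (List.range (bs.length + 1)).reverse = bs.length :: (List.range bs.length).reverse := by
    simp [List.range_succ]
  simp only [pvOuterA, hrev, List.foldl_cons]
  have h0 : bs.length + 1 - 1 - bs.length = 0 := by omega
  rw [h0]
  have hb : PySem.List.pyGetD (b :: bs) ((0 : Nat) : Int) 0 = b := by simp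
  rw [hb, pvInnerA_eq]
  have hbody : ∀ (s : List Int × Nat) (i : Nat), i ∈ (List.range bs.length).reverse →
      pvInnerA extra (2 ^ i - 1)
        (s.1 ++ [PySem.List.pyGetD (b :: bs) (((bs.length + 1 - 1 - i : Nat) : Int)) 0], s.2)
      = pvInnerA extra (2 ^ i - 1)
        (s.1 ++ [PySem.List.pyGetD bs (((bs.length - 1 - i : Nat) : Int)) 0], s.2) := by
    intro s i hi
    have hi' : i < bs.length := by
      simpa using (List.mem_range.mp (List.mem_reverse.mp hi))
    have hidx : bs.length + 1 - 1 - i = (bs.length - 1 - i) + 1 := by omega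
    rw [hidx, PySem.List.pyGetD_natCast, PySem.List.pyGetD_natCast, List.getD_cons_succ]
  have hinit : r ++ [b] ++ pvChunk extra c (2 ^ bs.length - 1)
      = r ++ b :: pvChunk extra c (2 ^ bs.length - 1) := by simp
  rw [hinit, PySem.List.foldl_congr_mem _ _ _ _ hbody]

lemma pvA_eq_spec : ∀ (rb extra r : List Int) (c : Nat),
    (pvOuterA rb extra rb.length (r, c)).1
      ++ [PySem.List.pyGetD extra (((pvOuterA rb extra rb.length (r, c)).2 : Nat) : Int) 0]
    = r ++ pvSpec rb extra c := by
  intro rb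
  induction rb with
  | nil => intro extra r c; simp [pvOuterA, pvSpec]
  | cons b bs ih =>
      intro extra r c
      rw [show (b :: bs).length = bs.length + 1 from rfl, pvOuterA_cons, ih]
      simp [pvSpec, List.append_assoc]

lemma pvChunk_eq_take (extra : List Int) (c m : Nat) (h : c + m ≤ extra.length) :
    pvChunk extra c m = (extra.drop c).take m := by
  induction m with
  | zero => simp [pvChunk]
  | succ m ih =>
      have hd : (extra.drop c)[m]? = some extra[c + m] := by
        rw [List.getElem?_drop]
        exact List.getElem?_eq_getElem (by omega)
      have hget : PySem.List.pyGetD extra (((c + m : Nat) : Int)) 0 = extra[c + m] := by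
        rw [PySem.List.pyGetD_natCast]
        exact List.getD_eq_getElem extra 0 (by omega)
      rw [pvChunk_succ, ih (by omega), List.take_add_one, hd, hget]
      simp

lemma pvSpec_eq_alt : ∀ (rb extra : List Int) (c : Nat),
    c + (2 ^ rb.length - rb.length) ≤ extra.length →
    pvSpec rb extra c = prepare_reg_un_alt rb (extra.drop c) := by
  intro rb
  induction rb with
  | nil =>
      intro extra c h
      simp only [pvSpec, prepare_reg_un_alt]
      have hc : c < extra.length := by simp at h; omega
      rw [PySem.List.pyGetD_natCast, PySem.List.pyGetD_zero]
      rw [List.getD_eq_getElem extra 0 hc, List.getD_eq_getElem _ 0 (by simp; omega)]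
      simp [List.getElem_drop]
  | cons b bs ih =>
      intro extra c h
      have hpow : bs.length < 2 ^ bs.length := Nat.lt_two_pow_self
      have hlen : c + (2 ^ bs.length - 1) + (2 ^ bs.length - bs.length) ≤ extra.length := by
        have h2 : 2 ^ (bs.length + 1) = 2 * 2 ^ bs.length := by ring
        rw [show (b :: bs).length = bs.length + 1 from rfl, h2] at h
        omega
      simp only [pvSpec, prepare_reg_un_alt]
      rw [ih extra (c + (2 ^ bs.length - 1)) hlen]
      rw [PySem.List.slice_to_natCast, PySem.List.slice_from_natCast]
      rw [pvChunk_eq_take extra c (2 ^ bs.length - 1) (by omega)]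
      rw [List.drop_drop]
      simp

-- ===== VERDICT (by name: the statement is the Claim_ definition above) =====
theorem prepare_reg_un_spec : Claim_equal_prepare_reg_un := by
  intro rb re _hdom hpre
  unfold Spec_prepare_reg_un
  show prepare_reg_un rb re = prepare_reg_un_alt rb re
  have hA := pvA_eq_spec rb re [] 0
  have hB := pvSpec_eq_alt rb re 0 (by unfold Pre_prepare_reg_un at hpre; omega)
  simp only [List.nil_append] at hA
  simp only [List.drop_zero] at hB
  rw [prepare_reg_un]
  exact hA.trans hB
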